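-- pv_equiv track=rewrite | github.com/CelilOzkan/Shape_Drawer | Main.py | width_finder_of_rows
-- ===== SOURCE A (Python) =====
-- def width_finder_of_shapes(string):  # If the input is "DL", "N" or "B", it will return width of 0
--     starting_letter = string[0]
--     if starting_letter == "T":
--         height = int(string[1: len(string)])
--         width = (height * 2) - 1
--         return width
--     if starting_letter == "V" or starting_letter == "S" or starting_letter == "O":
--         width = int(string[1: len(string)])
--         return width
--     if starting_letter == "E" or starting_letter == "R":
--         x_index = string.index("x")
--         width = int(string[(x_index + 1): len(string)])
--         return width
--     else:
--         return 0
--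
-- def width_finder_of_rows(row_string):
--     total_width = 0
--     list_of_shapes_in_the_row = row_string.split(",")
--
--     dl_counter = list_of_shapes_in_the_row.count("DL")
--     n_counter = list_of_shapes_in_the_row.count("N")
--     b_counter = list_of_shapes_in_the_row.count("B")
--
--     for i in range(len(list_of_shapes_in_the_row) - 1): # Width coming from the space characters between any two shapes
--         total_width += 1
--     for i in range(dl_counter + n_counter + b_counter): # To avoid overcounting
--         total_width -= 1
--     for shape in list_of_shapes_in_the_row: # Width coming from the shapes' own widths
--         width = width_finder_of_shapes(shape)
--         total_width += width
--     return total_width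
-- ===== SOURCE B (Python) =====
-- def width_finder_of_shapes(shape):
--     c = shape[0]
--     if c in "VSO":
--         return int(shape[1:])
--     if c == "T":
--         return 2 * int(shape[1:]) - 1
--     if c in "ER":
--         return int(shape[shape.index("x") + 1:])
--     return 0
--
--
-- def width_finder_of_rows(row_string):
--     # Consume the string itself with str.partition: no shape list, no count passes.
--     total = 0
--     rest = row_string
--     while True:
--         head, sep, rest = rest.partition(",")
--         total += -1 if head in ("DL", "N", "B") else width_finder_of_shapes(head)
--         if sep == "":
--             return total
--         total += 1
-- ===== Notes on version B (the rewrite author's own statement) =====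
-- stated objective: alternative
-- what changed: B never builds the shape list: it consumes the row string itself by repeated str.partition(",") with one running total, replacing A's split-into-list plus three .count scans plus three separate accumulation loops.
-- outside the precondition, e.g. on width_finder_of_rows(','): A raises IndexError, B raises IndexError
import Mathlib
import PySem

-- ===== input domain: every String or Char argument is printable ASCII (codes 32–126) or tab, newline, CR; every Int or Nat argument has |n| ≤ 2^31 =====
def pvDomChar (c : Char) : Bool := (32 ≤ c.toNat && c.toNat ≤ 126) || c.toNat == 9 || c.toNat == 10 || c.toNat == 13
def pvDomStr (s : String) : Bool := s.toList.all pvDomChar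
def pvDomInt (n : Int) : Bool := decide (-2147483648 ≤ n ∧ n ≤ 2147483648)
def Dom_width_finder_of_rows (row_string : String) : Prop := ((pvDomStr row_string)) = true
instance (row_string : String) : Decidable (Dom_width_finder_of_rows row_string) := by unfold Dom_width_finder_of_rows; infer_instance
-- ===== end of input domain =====

-- B consumes the row string itself by repeated str.partition with one running total — no shape list is
-- built and no .count passes are made (objective: simpler; same results, same raising inputs).

-- ===== PORT A =====
-- width_finder_of_shapes: Option = none exactly where Python raises (IndexError on "", ValueError from int()/index())
def widthShapeA (s : String) : Option Int :=
  match PySem.Str.pyGet? s 0 with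
  | none => none
  | some c =>
    if c = 'T' then
      (PySem.Int.ofStr? (PySem.Str.slice s (some 1) (some (PySem.Str.len s)))).map (fun h => h * 2 - 1)
    else if c = 'V' ∨ c = 'S' ∨ c = 'O' then
      PySem.Int.ofStr? (PySem.Str.slice s (some 1) (some (PySem.Str.len s)))
    else if c = 'E' ∨ c = 'R' then
      -- string.index("x") raises ValueError when absent: find = -1 ↦ none
      let xi := PySem.Str.find s "x"
      if xi = -1 then none
      else PySem.Int.ofStr? (PySem.Str.slice s (some (xi + 1)) (some (PySem.Str.len s)))
    else some 0

def width_finder_of_rows (row_string : String) : Int :=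
  let shapes := (PySem.Str.split? row_string ",").getD []   -- sep "," ≠ "" so split? is always some
  let dl := PySem.List.count shapes "DL"
  let nc := PySem.List.count shapes "N"
  let bc := PySem.List.count shapes "B"
  let t1 := (PySem.List.pyRange 0 ((shapes.length : Int) - 1)).foldl (fun t _ => t + 1) (0 : Int)
  let t2 := (PySem.List.pyRange 0 (((dl : Int) + nc) + bc)).foldl (fun t _ => t - 1) t1
  ((shapes.foldl (fun (acc : Option Int) sh =>
      match acc, widthShapeA sh with
      | some t, some w => some (t + w)
      | _, _ => none) (some t2))).getD 0

-- ===== PORT B =====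
def widthShapeB (s : String) : Option Int :=
  match PySem.Str.pyGet? s 0 with
  | none => none
  | some c =>
    if c = 'V' ∨ c = 'S' ∨ c = 'O' then
      PySem.Int.ofStr? (PySem.Str.slice s (some 1) none)
    else if c = 'T' then
      (PySem.Int.ofStr? (PySem.Str.slice s (some 1) none)).map (fun h => 2 * h - 1)
    else if c = 'E' ∨ c = 'R' then
      let xi := PySem.Str.find s "x"
      if xi = -1 then none
      else PySem.Int.ofStr? (PySem.Str.slice s (some (xi + 1)) none)
    else some 0

-- per-step value of B's loop body: -1 for "DL"/"N"/"B", else the shape's own width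
def contribB (s : String) : Option Int :=
  if s = "DL" ∨ s = "N" ∨ s = "B" then some (-1) else widthShapeB s

-- B's while-loop: rest.partition(",") ported exactly as find + the two slices (head / tail)
def bgo (total : Int) (cs : List Char) : Option Int :=
  if h : PySem.Chars.find cs [','] = -1 then  -- partition found no separator
    (contribB (String.ofList cs)).map (fun w => total + w)
  else
    match contribB (String.ofList (PySem.List.slice cs (some 0) (some (PySem.Chars.find cs [','])))) with
    | none => none
    | some w => bgo (total + w + 1) (PySem.List.slice cs (some (PySem.Chars.find cs [','] + 1)) none)
termination_by cs.length
decreasing_by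
  have h0 : 0 ≤ PySem.Chars.find cs [','] := by
    have := PySem.Chars.neg_one_le_find cs [',']
    omega
  have hne : cs ≠ [] := by
    intro hnil
    subst hnil
    exact h ((PySem.Chars.find_eq_neg_one_iff [] [',']).mpr (by simp))
  rw [PySem.List.slice_from _ (by omega : (0:Int) ≤ PySem.Chars.find cs [','] + 1)]
  have : 1 ≤ (PySem.Chars.find cs [','] + 1).toNat := by omega
  simp only [List.length_drop]
  cases cs with
  | nil => exact absurd rfl hne
  | cons a l => simp; omega

def width_finder_of_rows_alt (row_string : String) : Int :=
  (bgo 0 row_string.toList).getD 0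

-- ===== PRECONDITION & SPEC =====
-- Pre_ excludes exactly the inputs where Python A raises: a shape that is empty (IndexError),
-- whose numeric tail does not parse as int (ValueError), or an E/R shape without an 'x' (ValueError).
def shapeOK (s : String) : Bool :=
  match PySem.Str.pyGet? s 0 with
  | none => false
  | some c =>
    if c = 'T' ∨ c = 'V' ∨ c = 'S' ∨ c = 'O' then
      (PySem.Int.ofStr? (PySem.Str.slice s (some 1) none)).isSome
    else if c = 'E' ∨ c = 'R' then
      PySem.Str.find s "x" != -1 &&
        (PySem.Int.ofStr? (PySem.Str.slice s (some (PySem.Str.find s "x" + 1)) none)).isSome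
    else true

def Pre_width_finder_of_rows (row_string : String) : Prop :=
  ∀ sh ∈ (PySem.Str.split? row_string ",").getD [], shapeOK sh = true
instance (row_string : String) : Decidable (Pre_width_finder_of_rows row_string) := by
  unfold Pre_width_finder_of_rows; infer_instance

def pvWitness_width_finder_of_rows : String := "T3,DL,V5,N,E2x4,B,R10x3,S0,O7,Q"

def Spec_width_finder_of_rows (row_string : String) (out : Int) : Prop := out = width_finder_of_rows_alt row_string
instance (row_string : String) (out : Int) : Decidable (Spec_width_finder_of_rows row_string out) := by unfold Spec_width_finder_of_rows; infer_instance

-- ===== CLAIM (what is proved, stated in full; the proofs are below) =====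
def Claim_equal_width_finder_of_rows : Prop := ∀ (row_string : String), Dom_width_finder_of_rows row_string → Pre_width_finder_of_rows row_string → Spec_width_finder_of_rows row_string (width_finder_of_rows row_string)

-- ===== LEMMAS AND PROOFS =====

def wA (s : String) : Int := (widthShapeA s).getD 0
def tripB (s : String) : Bool := decide (s = "DL" ∨ s = "N" ∨ s = "B")

-- reference splitter: what row_string.split(",") produces, by structural recursion on the chars
def spl : List Char → List (List Char)
  | [] => [[]]
  | c :: rest => if c = ',' then [] :: spl rest else (spl rest).modifyHead (fun h => c :: h)

theorem spl_ne_nil (cs : List Char) : spl cs ≠ [] := by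
  cases cs with
  | nil => simp [spl]
  | cons c rest =>
    simp only [spl]
    split_ifs
    · simp
    · intro h
      have := congrArg List.length h
      simp [List.length_modifyHead] at this
      exact spl_ne_nil rest this

theorem strSlice_len (s : String) (a : Option Int) :
    PySem.Str.slice s a (some (PySem.Str.len s)) = PySem.Str.slice s a none := by
  simp [PySem.Str.slice, PySem.Str.len, PySem.List.slice]

theorem shapeB_eq (s : String) : widthShapeB s = widthShapeA s := by
  unfold widthShapeA widthShapeB
  cases h : PySem.Str.pyGet? s 0 with
  | none => rfl
  | some c =>
    simp only [strSlice_len]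
    split_ifs <;> simp_all <;> (congr 1; funext h; ring)

theorem shapeOK_some (s : String) (h : shapeOK s = true) : ∃ w, widthShapeA s = some w := by
  unfold shapeOK at h
  unfold widthShapeA
  cases hg : PySem.Str.pyGet? s 0 with
  | none =>
    rw [hg] at h
    simp at h
  | some c =>
    rw [hg] at h
    simp only [strSlice_len]
    by_cases h1 : c = 'T' <;> by_cases h2 : c = 'V' ∨ c = 'S' ∨ c = 'O' <;>
      by_cases h3 : c = 'E' ∨ c = 'R' <;>
      simp_all [Option.isSome_iff_exists]

theorem trip_width_zero (s : String) (h : tripB s = true) : widthShapeA s = some 0 := by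
  unfold tripB at h
  rcases of_decide_eq_true h with h | h | h <;> subst h <;> decide

-- under shapeOK, B's per-shape contribution is the width minus the zero-width correction
theorem contrib_eq (s : String) (h : shapeOK s = true) :
    contribB s = some (wA s - if tripB s then 1 else 0) := by
  unfold contribB
  by_cases ht : s = "DL" ∨ s = "N" ∨ s = "B"
  · have htb : tripB s = true := by simp [tripB, ht]
    have h0 : widthShapeA s = some 0 := trip_width_zero s htb
    simp [ht, htb, wA, h0]
  · obtain ⟨w, hw⟩ := shapeOK_some s h
    have htb : tripB s = false := by simp [tripB]; tauto
    simp [ht, htb, shapeB_eq, hw, wA]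

-- ---- facts about Chars.find for the single-character separator ----

theorem single_prefix_iff (a : Char) (m : List Char) : [a] <+: m ↔ ∃ t, m = a :: t := by
  constructor
  · rintro ⟨t, ht⟩
    exact ⟨t, by simpa using ht.symm⟩
  · rintro ⟨t, rfl⟩
    exact ⟨t, rfl⟩

theorem single_infix_iff (a : Char) (l : List Char) : [a] <:+: l ↔ a ∈ l := by
  constructor
  · rintro ⟨s, t, rfl⟩
    simp
  · intro h
    obtain ⟨s, t, rfl⟩ := List.append_of_mem h
    exact ⟨s, t, by simp⟩

theorem find_unique (cs : List Char) (k : Nat)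
    (h1 : [','] <+: cs.drop k) (h2 : ∀ i, i < k → ¬ [','] <+: cs.drop i) :
    PySem.Chars.find cs [','] = k := by
  have hin : [','] <:+: cs := by
    have hsfx : cs.drop k <:+ cs := List.drop_suffix k cs
    exact h1.isInfix.trans hsfx.isInfix
  have hfnn : 0 ≤ PySem.Chars.find cs [','] := (PySem.Chars.find_nonneg_iff cs [',']).mpr hin
  obtain ⟨hp, hmin⟩ := PySem.Chars.find_spec hfnn
  have hk : (PySem.Chars.find cs [',']).toNat = k := by
    rcases lt_trichotomy (PySem.Chars.find cs [',']).toNat k with hlt | heq | hgt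
    · exact absurd hp (h2 _ hlt)
    · exact heq
    · exact absurd h1 (hmin k hgt)
  omega

theorem find_cons_comma (rest : List Char) : PySem.Chars.find (',' :: rest) [','] = 0 := by
  have := find_unique (',' :: rest) 0 (by exact ⟨rest, rfl⟩) (by omega)
  simpa using this

theorem find_cons_ne (c : Char) (rest : List Char) (hc : c ≠ ',') :
    PySem.Chars.find (c :: rest) [','] =
      (if PySem.Chars.find rest [','] = -1 then -1 else PySem.Chars.find rest [','] + 1) := by
  by_cases hr : PySem.Chars.find rest [','] = -1
  · rw [if_pos hr]
    have hnr : ',' ∉ rest := fun hm =>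
      ((PySem.Chars.find_eq_neg_one_iff rest [',']).mp hr) ((single_infix_iff ',' rest).mpr hm)
    apply (PySem.Chars.find_eq_neg_one_iff _ _).mpr
    intro hin
    have hm := (single_infix_iff ',' (c :: rest)).mp hin
    rcases List.mem_cons.mp hm with hh | hh
    · exact hc hh.symm
    · exact hnr hh
  · rw [if_neg hr]
    have hr0 : 0 ≤ PySem.Chars.find rest [','] := by
      have := PySem.Chars.neg_one_le_find rest [',']
      omega
    obtain ⟨hp, hmin⟩ := PySem.Chars.find_spec hr0
    have := find_unique (c :: rest) ((PySem.Chars.find rest [',']).toNat + 1)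
      (by simpa using hp)
      (by
        intro i hi
        cases i with
        | zero =>
          rw [List.drop_zero]
          intro hpre
          obtain ⟨tl, htl⟩ := (single_prefix_iff ',' (c :: rest)).mp hpre
          exact hc (by injection htl)
        | succ i' =>
          simp only [List.drop_succ_cons]
          exact hmin i' (by omega))
    omega

-- spl splits at the first comma
theorem spl_no_comma (cs : List Char) (h : ',' ∉ cs) : spl cs = [cs] := by
  induction cs with
  | nil => rfl
  | cons c rest ih =>
    simp only [List.mem_cons, not_or] at h
    simp [spl, Ne.symm h.1, ih h.2]

theorem spl_comma (cs : List Char) (h0 : 0 ≤ PySem.Chars.find cs [',']) :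
    spl cs = cs.take (PySem.Chars.find cs [',']).toNat ::
              spl (cs.drop ((PySem.Chars.find cs [',']).toNat + 1)) := by
  induction cs with
  | nil =>
    exfalso
    have : PySem.Chars.find ([] : List Char) [','] = -1 :=
      (PySem.Chars.find_eq_neg_one_iff _ _).mpr (by simp)
    omega
  | cons c rest ih =>
    by_cases hc : c = ','
    · subst hc
      rw [find_cons_comma]
      simp [spl]
    · rw [find_cons_ne c rest hc] at h0 ⊢
      have hr : ¬ PySem.Chars.find rest [','] = -1 := by
        intro hn; rw [if_pos hn] at h0; omega
      have hr0 : 0 ≤ PySem.Chars.find rest [','] := by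
        have := PySem.Chars.neg_one_le_find rest [',']
        omega
      rw [if_neg hr]
      have htn : (PySem.Chars.find rest [','] + 1).toNat = (PySem.Chars.find rest [',']).toNat + 1 := by
        omega
      rw [htn]
      simp only [spl, if_neg hc, ih hr0]
      simp

-- ---- the splitOn loop computes spl ----

theorem modifyHead_nil_append (l : List (List Char)) :
    l.modifyHead (fun h => ([] : List Char) ++ h) = l := by
  cases l <;> simp

theorem go_spec (fuel : Nat) :
    ∀ (l cur : List Char) (acc : List (List Char)), l.length ≤ fuel →
      PySem.Chars.splitOn.go [','] fuel l cur acc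
        = acc.reverse ++ (spl l).modifyHead (fun h => cur.reverse ++ h) := by
  induction fuel with
  | zero =>
    intro l cur acc hl
    have : l = [] := List.length_eq_zero_iff.mp (Nat.le_zero.mp hl)
    subst this
    simp [PySem.Chars.splitOn.go, spl]
  | succ f ih =>
    intro l cur acc hl
    cases l with
    | nil => simp [PySem.Chars.splitOn.go, spl]
    | cons c rest =>
      simp only [PySem.Chars.splitOn.go]
      by_cases hc : c = ','
      · subst hc
        have hpre : [','].isPrefixOf (',' :: rest) = true := by simp [List.isPrefixOf]
        rw [if_pos hpre]
        simp only [List.length_singleton, List.drop_succ_cons, List.drop_zero]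
        rw [ih rest [] (cur.reverse :: acc) (by simpa using Nat.le_of_succ_le_succ hl)]
        simp [spl]
        cases hs : spl rest with
        | nil => exact absurd hs (spl_ne_nil rest)
        | cons a t => simp
      · have hpre : [','].isPrefixOf (c :: rest) = false := by
          simp [List.isPrefixOf]
          exact fun h => absurd h.symm hc
        rw [if_neg (by simp [hpre])]
        rw [ih rest (c :: cur) acc (by simpa using Nat.le_of_succ_le_succ hl)]
        simp only [spl, if_neg hc]
        cases hs : spl rest with
        | nil => exact absurd hs (spl_ne_nil rest)
        | cons a t => simp

theorem splitOn_eq_spl (cs : List Char) : PySem.Chars.splitOn cs [','] = spl cs := by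
  unfold PySem.Chars.splitOn
  rw [go_spec (cs.length + 1) cs [] [] (by omega)]
  simpa using modifyHead_nil_append (spl cs)

theorem shapesA_eq (rs : String) :
    (PySem.Str.split? rs ",").getD [] = (spl rs.toList).map String.ofList := by
  have hb := PySem.Str.split?_map rs ","
  have : PySem.Chars.split? rs.toList ",".toList = some (spl rs.toList) := by
    simp [PySem.Chars.split?, splitOn_eq_spl]
  rw [this] at hb
  cases hx : PySem.Str.split? rs "," with
  | none => rw [hx] at hb; simp at hb
  | some xs =>
    rw [hx] at hb
    simp only [Option.map_some, Option.some.injEq] at hb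
    have : xs = (spl rs.toList).map String.ofList := by
      have h2 := congrArg (List.map String.ofList) hb
      rw [List.map_map] at h2
      have h3 : List.map (String.ofList ∘ String.toList) xs = xs := by
        apply List.map_id''
        intro a
        simp
      rw [h3] at h2
      exact h2
    simp [this]

-- ---- A's staged loops summed up ----

theorem fold_inc {α : Type} (l : List α) (a : Int) :
    l.foldl (fun t _ => t + 1) a = a + l.length := by
  induction l generalizing a with
  | nil => simp
  | cons x xs ih => simp [ih]; ring

theorem fold_dec {α : Type} (l : List α) (a : Int) :
    l.foldl (fun t _ => t - 1) a = a - l.length := by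
  induction l generalizing a with
  | nil => simp
  | cons x xs ih => simp [ih]; ring

theorem foldA_eq (l : List String) (t : Int) (h : ∀ sh ∈ l, shapeOK sh = true) :
    l.foldl (fun (acc : Option Int) sh =>
      match acc, widthShapeA sh with
      | some t, some w => some (t + w)
      | _, _ => none) (some t) = some (t + (l.map wA).sum) := by
  induction l generalizing t with
  | nil => simp
  | cons x xs ih =>
    obtain ⟨w, hw⟩ := shapeOK_some x (h x (List.mem_cons_self ..))
    simp only [List.foldl_cons, hw, List.map_cons, List.sum_cons]
    rw [ih _ (fun sh hs => h sh (List.mem_cons_of_mem _ hs))]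
    simp [wA, hw]; ring

theorem count_eq_countP (l : List String) :
    PySem.List.count l "DL" + PySem.List.count l "N" + PySem.List.count l "B"
      = l.countP tripB := by
  induction l with
  | nil => simp [PySem.List.count]
  | cons x xs ih =>
    simp only [PySem.List.count, List.count_cons, List.countP_cons] at *
    by_cases h1 : x = "DL" <;> by_cases h2 : x = "N" <;> by_cases h3 : x = "B" <;>
      simp_all [tripB] <;> omega

theorem sum_split (l : List String) :
    (l.map (fun sh => wA sh - if tripB sh then 1 else 0)).sum
      = (l.map wA).sum - (l.countP tripB : Int) := by
  induction l with
  | nil => simp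
  | cons x xs ih =>
    simp only [List.map_cons, List.sum_cons, List.countP_cons, ih]
    by_cases h : tripB x = true <;> simp [h] <;> ring

-- ---- B's partition loop summed up ----

theorem bgo_nocomma (cs : List Char) (t : Int)
    (h : PySem.Chars.find cs [','] = -1)
    (hOK : ∀ sh ∈ (spl cs).map String.ofList, shapeOK sh = true) :
    bgo t cs = some (t + (((spl cs).map String.ofList).map
        (fun sh => wA sh - if tripB sh then 1 else 0)).sum + ((spl cs).length - 1)) := by
  have hnc : ',' ∉ cs := fun hm =>
    ((PySem.Chars.find_eq_neg_one_iff cs [',']).mp h) ((single_infix_iff ',' cs).mpr hm)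
  have hs : spl cs = [cs] := spl_no_comma cs hnc
  have hok : shapeOK (String.ofList cs) = true := hOK _ (by simp [hs])
  rw [bgo, dif_pos h, contrib_eq _ hok, hs]
  simp

theorem bgo_spec (n : Nat) : ∀ (cs : List Char), cs.length ≤ n → ∀ (t : Int),
    (∀ sh ∈ (spl cs).map String.ofList, shapeOK sh = true) →
    bgo t cs = some (t + (((spl cs).map String.ofList).map
        (fun sh => wA sh - if tripB sh then 1 else 0)).sum + ((spl cs).length - 1)) := by
  induction n with
  | zero =>
    intro cs hl t hOK
    have hnil : cs = [] := List.length_eq_zero_iff.mp (Nat.le_zero.mp hl)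
    subst hnil
    exact bgo_nocomma [] t ((PySem.Chars.find_eq_neg_one_iff _ _).mpr (by simp)) hOK
  | succ m ih =>
    intro cs hl t hOK
    by_cases h : PySem.Chars.find cs [','] = -1
    · exact bgo_nocomma cs t h hOK
    · have h0 : 0 ≤ PySem.Chars.find cs [','] := by
        have := PySem.Chars.neg_one_le_find cs [',']
        omega
      have hlen : (PySem.Chars.find cs [',']).toNat < cs.length := by
        obtain ⟨hp, _⟩ := PySem.Chars.find_spec h0
        obtain ⟨tl, htl⟩ := (single_prefix_iff ',' _).mp hp
        have := congrArg List.length htl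
        simp at this
        omega
      have hspl := spl_comma cs h0
      have hsl1 : PySem.List.slice cs (some 0) (some (PySem.Chars.find cs [','])) =
          cs.take (PySem.Chars.find cs [',']).toNat := by
        rw [PySem.List.slice_toNat cs (by omega) h0]
        simp
      have hsl2 : PySem.List.slice cs (some (PySem.Chars.find cs [','] + 1)) none =
          cs.drop ((PySem.Chars.find cs [',']).toNat + 1) := by
        rw [PySem.List.slice_from cs (by omega)]
        congr 1
        omega
      have hokh : shapeOK (String.ofList (cs.take (PySem.Chars.find cs [',']).toNat)) = true :=
        hOK _ (by rw [hspl]; simp)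
      rw [bgo, dif_neg h, hsl1, hsl2, contrib_eq _ hokh]
      dsimp only
      rw [ih (cs.drop ((PySem.Chars.find cs [',']).toNat + 1))
            (by simp [List.length_drop]; omega) _
            (fun sh hs => hOK sh (by rw [hspl]; simp; right; simpa using hs))]
      rw [hspl]
      simp only [List.map_cons, List.sum_cons, List.length_cons]
      congr 1
      push_cast
      ring

-- ===== VERDICT (by name: the statement is the Claim_ definition above) =====
theorem width_finder_of_rows_spec : Claim_equal_width_finder_of_rows := by
  intro rs _ hpre
  unfold Spec_width_finder_of_rows
  unfold Pre_width_finder_of_rows at hpre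
  rw [shapesA_eq] at hpre
  simp only [width_finder_of_rows, width_finder_of_rows_alt]
  rw [shapesA_eq]
  rw [bgo_spec rs.toList.length rs.toList le_rfl 0 hpre]
  cases hsl : spl rs.toList with
  | nil => exact absurd hsl (spl_ne_nil _)
  | cons x xs =>
    rw [hsl] at hpre
    have e1 : (PySem.List.pyRange 0 ((((x :: xs).map String.ofList).length : Int) - 1)).foldl
        (fun t _ => t + 1) (0 : Int) = (xs.length : Int) := by
      have hc : (((x :: xs).map String.ofList).length : Int) - 1 = ((xs.length : Nat) : Int) := by
        simp
      rw [hc, PySem.List.pyRange_zero_natCast, fold_inc]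
      simp
    rw [e1, List.map_cons]
    have e2 : ((PySem.List.count (String.ofList x :: xs.map String.ofList) "DL" : Int)
          + PySem.List.count (String.ofList x :: xs.map String.ofList) "N")
        + PySem.List.count (String.ofList x :: xs.map String.ofList) "B"
        = (((String.ofList x :: xs.map String.ofList).countP tripB : Nat) : Int) := by
      rw [← count_eq_countP]; push_cast; ring
    rw [e2, PySem.List.pyRange_zero_natCast, fold_dec, foldA_eq _ _ (by simpa using hpre)]
    simp only [List.map_cons, Option.getD_some, List.sum_cons, List.countP_cons,
      List.length_map, List.length_cons]
    have hss := sum_split (xs.map String.ofList)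
    simp only [List.sum_cons] at hss ⊢
    rw [hss]
    by_cases ht : tripB (String.ofList x) = true
    · have h0 : wA (String.ofList x) = 0 := by
        simp [wA, trip_width_zero _ ht]
      simp [ht, h0]
      ring
    · simp [ht]
      ring
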